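-- pv_equiv track=rewrite | github.com/Arsen1302/Code-copy-detector | TestData/solutions/problem_635_5_1.py | solution_635_5_1
-- ===== SOURCE A (Python) =====
-- from typing import List
--
-- def solution_635_5_1(arr: List[int]) -> bool:
--
--     def solution_635_5_2(nums) :
--         stack = []
--         while nums :
--             top = nums.pop(0)
--
--             if stack and 2*stack[0] == top :
--                 stack.pop(0)
--             else:
--                 stack.append(top)
--         if not stack :
--             return True
--         return False
--
--     nega = []
--     posi = []
--     zero = 0
--
--     for num in arr :
--         if num < 0 :
--             nega.append(num)
--         elif num > 0 :
--             posi.append(num)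
--         else :
--             zero += 1
--
--     if zero%2 != 0 or len(nega)%2 != 0 or len(posi)%2 != 0 :
--         return False
--
--     nega.sort(reverse=True)
--     posi.sort()
--     return solution_635_5_2(nega) and solution_635_5_2(posi)
-- ===== SOURCE B (Python) =====
-- from typing import List
--
-- def solution_635_5_1(arr: List[int]) -> bool:
--     # Sort by absolute value, then repeatedly pair the smallest-magnitude
--     # remaining element with its double; zeros pair with zeros (2*0 == 0).
--     rest = sorted(arr, key=abs)
--     while rest:
--         x = rest.pop(0)
--         try:
--             rest.remove(2 * x)
--         except ValueError:
--             return False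
--     return True
-- ===== Notes on version B (the rewrite author's own statement) =====
-- stated objective: simpler
-- what changed: Replaces A's three-way sign partition + per-class parity checks + FIFO-queue matching with a single sort by absolute value followed by one greedy pass that pops the smallest-magnitude element and removes its double (zeros pair implicitly since 2*0 == 0).
import Mathlib
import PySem

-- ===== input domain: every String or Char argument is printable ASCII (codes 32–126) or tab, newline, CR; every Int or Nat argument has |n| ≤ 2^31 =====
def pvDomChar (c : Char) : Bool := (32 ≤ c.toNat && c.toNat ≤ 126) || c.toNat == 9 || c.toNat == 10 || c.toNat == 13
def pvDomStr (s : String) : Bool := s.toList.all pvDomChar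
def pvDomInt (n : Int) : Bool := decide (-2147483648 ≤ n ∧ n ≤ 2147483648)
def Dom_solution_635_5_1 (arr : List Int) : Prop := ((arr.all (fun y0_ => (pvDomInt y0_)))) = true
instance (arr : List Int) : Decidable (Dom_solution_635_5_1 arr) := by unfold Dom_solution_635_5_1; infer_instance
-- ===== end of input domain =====

-- B replaces A's sign partition + parity checks + FIFO-queue matching by one sort
-- by absolute value followed by a greedy smallest-first pair-removal pass (objective: simpler).

-- ===== PORT A =====
-- inner helper solution_635_5_2: FIFO loop 'top = nums.pop(0); match against stack[0] or append'
def pvQueue : List Int → List Int → Bool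
  | [], stack => stack.isEmpty
  | top :: nums, stack =>
    match stack with
    | s0 :: srest =>
      if 2 * s0 = top then pvQueue nums srest
      else pvQueue nums ((s0 :: srest) ++ [top])
    | [] => pvQueue nums [top]

def solution_635_5_1 (arr : List Int) : Bool :=
  -- the for-loop partitioning arr into nega / posi / zero
  let st := arr.foldl (fun (acc : List Int × List Int × Int) num =>
    if num < 0 then (acc.1 ++ [num], acc.2.1, acc.2.2)
    else if num > 0 then (acc.1, acc.2.1 ++ [num], acc.2.2)
    else (acc.1, acc.2.1, acc.2.2 + 1)) ([], [], 0)
  if PySem.Int.mod st.2.2 2 ≠ 0 ∨ PySem.Int.mod (st.1.length : Int) 2 ≠ 0 ∨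
      PySem.Int.mod (st.2.1.length : Int) 2 ≠ 0 then false
  else
    pvQueue (PySem.List.sorted st.1 (fun x => x) true) [] &&
    pvQueue (PySem.List.sorted st.2.1 (fun x => x) false) []

-- ===== PORT B =====
-- termination helper for the while-loop recursion (rest shrinks by one at each remove)
theorem pv_remove?_length {l : List Int} {v : Int} {l' : List Int}
    (h : PySem.List.remove? l v = some l') : l'.length < l.length := by
  by_cases hm : v ∈ l
  · rw [PySem.List.remove?_eq_some_erase l v hm] at h
    cases h
    have h1 := List.length_erase_of_mem hm
    have h2 : l.length ≠ 0 := by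
      intro h0
      rw [List.length_eq_zero_iff] at h0
      subst h0; simp at hm
    omega
  · rw [(PySem.List.remove?_eq_none_iff l v).mpr hm] at h; cases h

-- the while-loop: pop the front x, remove 2*x from the rest (False on ValueError)
def pvPairOff : List Int → Bool
  | [] => true
  | x :: rest =>
    match hrm : PySem.List.remove? rest (2 * x) with
    | some rest' => pvPairOff rest'
    | none => false
termination_by l => l.length
decreasing_by
  simp only [List.length_cons]
  exact Nat.lt_succ_of_lt (pv_remove?_length hrm)

def solution_635_5_1_alt (arr : List Int) : Bool :=
  pvPairOff (PySem.List.sorted arr (fun x => |x|) false)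

-- ===== PRECONDITION & SPEC =====
def Spec_solution_635_5_1 (arr : List Int) (out : Bool) : Prop := out = solution_635_5_1_alt arr
instance (arr : List Int) (out : Bool) : Decidable (Spec_solution_635_5_1 arr out) := by unfold Spec_solution_635_5_1; infer_instance

-- ===== CLAIM (what is proved, stated in full; the proofs are below) =====
def Claim_equal_solution_635_5_1 : Prop := ∀ (arr : List Int), Dom_solution_635_5_1 arr → Spec_solution_635_5_1 arr (solution_635_5_1 arr)

-- ===== LEMMAS AND PROOFS =====

theorem pvPairOff_nil : pvPairOff [] = true := by simp [pvPairOff]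

theorem pvPairOff_cons (x : Int) (rest : List Int) :
    pvPairOff (x :: rest) =
      match PySem.List.remove? rest (2 * x) with
      | some rest' => pvPairOff rest'
      | none => false := by
  rw [pvPairOff]
  cases PySem.List.remove? rest (2 * x) <;> simp

-- A's partition loop computes the two sign filters and the zero count
theorem pv_partition (arr : List Int) (n p : List Int) (z : Int) :
    arr.foldl (fun (acc : List Int × List Int × Int) num =>
      if num < 0 then (acc.1 ++ [num], acc.2.1, acc.2.2)
      else if num > 0 then (acc.1, acc.2.1 ++ [num], acc.2.2)
      else (acc.1, acc.2.1, acc.2.2 + 1)) (n, p, z)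
    = (n ++ arr.filter (fun x => decide (x < 0)),
       p ++ arr.filter (fun x => decide (0 < x)),
       z + ((arr.filter (fun x => decide (x = 0))).length : Int)) := by
  induction arr generalizing n p z with
  | nil => simp
  | cons a arr ih =>
    simp only [List.foldl_cons, List.filter_cons]
    rcases lt_trichotomy a 0 with h | h | h
    · have h1 : ¬ (0 < a) := by omega
      have h2 : ¬ (a = 0) := by omega
      simp only [h, h1, h2, if_pos, decide_true, decide_false, ite_false]
      rw [ih]
      simp
    · subst h
      simp only [lt_irrefl, decide_false, decide_true, ite_false, ite_true]
      rw [ih]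
      simp [List.length_cons]
      ring
    · have h1 : ¬ (a < 0) := by omega
      have h2 : ¬ (a = 0) := by omega
      simp only [h, h1, h2, decide_true, decide_false, ite_true, ite_false]
      rw [ih]
      simp

-- removing a value not in the prefix removes the explicit occurrence
theorem pv_remove_mid (t r : List Int) (v : Int) (hv : v ∉ t) :
    PySem.List.remove? (t ++ v :: r) v = some (t ++ r) := by
  induction t with
  | nil => simp [PySem.List.remove?_cons_self]
  | cons a t ih =>
    have ha : a ≠ v := by intro h; exact hv (h ▸ List.mem_cons_self)
    have hv' : v ∉ t := fun h => hv (List.mem_cons_of_mem _ h)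
    simp only [List.cons_append, PySem.List.remove?_cons_of_ne _ ha, ih hv']
    rfl

-- MAIN LEMMA: on a nondecreasing list, A's queue equals B's pair-removal pass
theorem pv_queue_eq_pairOff (l : List Int) : ∀ (s : List Int),
    (s ++ l).Pairwise (· ≤ ·) →
    (∀ a t, s = a :: t → (2*a) ∉ t) →
    pvQueue l s = pvPairOff (s ++ l) := by
  induction l with
  | nil =>
    intro s hsort hinv
    cases s with
    | nil => simp [pvQueue, pvPairOff_nil]
    | cons a t =>
      rw [List.append_nil, pvPairOff_cons,
        (PySem.List.remove?_eq_none_iff t (2*a)).mpr (hinv a t rfl)]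
      simp [pvQueue]
  | cons top nums ih =>
    intro s hsort hinv
    cases s with
    | nil =>
      have hstep : pvQueue (top :: nums) [] = pvQueue nums [top] := rfl
      rw [List.nil_append, hstep]
      have := ih [top] (by simpa using hsort)
        (by intro a t h; cases h; simp)
      simpa using this
    | cons a t =>
      by_cases h2 : 2 * a = top
      · -- the queue matches: pop the front
        have hq : pvQueue (top :: nums) (a :: t) = pvQueue nums t := by
          simp [pvQueue, h2]
        have hnotin : (2*a) ∉ t := hinv a t rfl
        have hmid : PySem.List.remove? (t ++ top :: nums) (2*a) = some (t ++ nums) := by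
          rw [← h2]; exact pv_remove_mid t nums (2*a) hnotin
        rw [hq, List.cons_append, pvPairOff_cons, hmid]
        -- invariant is preserved after the pop
        have hsub : (t ++ nums).Sublist ((a :: t) ++ top :: nums) := by
          refine List.Sublist.trans ?_ (List.sublist_cons_self a (t ++ top :: nums))
          exact List.Sublist.append_left (List.sublist_cons_self top nums) t
        have hsort' : (t ++ nums).Pairwise (· ≤ ·) := hsort.sublist hsub
        refine ih t hsort' ?_
        intro b t' ht
        subst ht
        by_contra hc
        have hab : a ≤ b := (List.pairwise_cons.mp hsort).1 b (by simp)
        have htail : ((b :: t') ++ top :: nums).Pairwise (· ≤ ·) :=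
          (List.pairwise_cons.mp hsort).2
        have htail' : (t' ++ top :: nums).Pairwise (· ≤ ·) :=
          (List.pairwise_cons.mp (by simpa using htail)).2
        have hbtop : 2*b ≤ top := by
          have := (List.pairwise_append.mp htail').2.2 (2*b) hc top (by simp)
          exact this
        have hba : b = a := by omega
        exact hnotin (by subst hba; exact List.mem_cons_of_mem _ hc)
      · -- no match: the top is appended to the stack
        have hq : pvQueue (top :: nums) (a :: t) = pvQueue nums ((a :: t) ++ [top]) := by
          simp [pvQueue, h2]
        have heq : ((a :: t) ++ [top]) ++ nums = (a :: t) ++ top :: nums := by simp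
        rw [hq, ih ((a :: t) ++ [top]) (by rw [heq]; exact hsort) ?_, heq]
        intro b t' ht
        rw [List.cons_append] at ht
        cases ht
        intro hmem
        rcases List.mem_append.mp hmem with hmem | hmem
        · exact hinv a t rfl hmem
        · simp at hmem; exact h2 (by omega)

-- negation transport
theorem pv_queue_neg (l : List Int) : ∀ s : List Int,
    pvQueue (l.map (fun x => -x)) (s.map (fun x => -x)) = pvQueue l s := by
  induction l with
  | nil => intro s; cases s <;> simp [pvQueue]
  | cons top nums ih =>
    intro s
    cases s with
    | nil =>
      have := ih [top]
      simpa [pvQueue] using this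
    | cons s0 srest =>
      simp only [List.map_cons, pvQueue]
      by_cases h : 2 * s0 = top
      · rw [if_pos (by omega : 2 * -s0 = -top), if_pos h]
        exact ih srest
      · rw [if_neg (by omega : ¬ 2 * -s0 = -top), if_neg h]
        have := ih ((s0 :: srest) ++ [top])
        simpa using this

theorem pv_remove_map_neg (l : List Int) (v : Int) :
    PySem.List.remove? (l.map (fun x => -x)) (-v)
      = (PySem.List.remove? l v).map (List.map (fun x => -x)) := by
  induction l with
  | nil => simp [PySem.List.remove?]
  | cons a l ih =>
    by_cases h : a = v
    · subst h
      simp [PySem.List.remove?_cons_self]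
    · rw [List.map_cons, PySem.List.remove?_cons_of_ne _ (by omega : -a ≠ -v),
        PySem.List.remove?_cons_of_ne _ h, ih]
      cases PySem.List.remove? l v <;> rfl

theorem pv_pairOff_neg (l : List Int) :
    pvPairOff (l.map (fun x => -x)) = pvPairOff l := by
  induction hn : l.length using Nat.strong_induction_on generalizing l with
  | _ n ih =>
  cases l with
  | nil => simp
  | cons x rest =>
    rw [List.map_cons, pvPairOff_cons, pvPairOff_cons]
    have hrw : (2 : Int) * -x = -(2 * x) := by ring
    rw [hrw, pv_remove_map_neg]
    cases hr : PySem.List.remove? rest (2 * x) with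
    | none => rfl
    | some rest' =>
      simp only [Option.map_some]
      exact ih rest'.length (by have := pv_remove?_length hr; simp at hn; omega) rest' rfl

-- removal commutes with a filter the removed value satisfies
theorem pv_remove_filter_pos (l : List Int) (v : Int) (p : Int → Bool) (hv : p v = true) :
    PySem.List.remove? (l.filter p) v = (PySem.List.remove? l v).map (List.filter p) := by
  induction l with
  | nil => simp [PySem.List.remove?]
  | cons a l ih =>
    by_cases h : a = v
    · subst h
      simp [hv, PySem.List.remove?_cons_self]
    · rw [PySem.List.remove?_cons_of_ne _ h]
      cases hp : p a with
      | true =>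
        rw [List.filter_cons_of_pos hp, PySem.List.remove?_cons_of_ne _ h, ih]
        cases PySem.List.remove? l v <;> simp [List.filter_cons_of_pos hp]
      | false =>
        have hfa : ¬ p a = true := by simp [hp]
        rw [List.filter_cons_of_neg hfa, ih]
        cases PySem.List.remove? l v with
        | none => rfl
        | some t => simp only [Option.map_some, List.filter_cons_of_neg hfa]

-- removal of a value a filter rejects leaves that filter unchanged
theorem pv_remove_filter_neg (l l' : List Int) (v : Int) (p : Int → Bool) (hv : p v = false)
    (h : PySem.List.remove? l v = some l') : l'.filter p = l.filter p := by
  induction l generalizing l' with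
  | nil => simp [PySem.List.remove?] at h
  | cons a l ih =>
    by_cases ha : a = v
    · subst ha
      rw [PySem.List.remove?_cons_self] at h
      cases h
      rw [List.filter_cons_of_neg (by simp [hv])]
    · rw [PySem.List.remove?_cons_of_ne _ ha] at h
      cases hr : PySem.List.remove? l v with
      | none => rw [hr] at h; cases h
      | some t =>
        rw [hr] at h
        cases h
        cases hp : p a with
        | true => rw [List.filter_cons_of_pos hp, List.filter_cons_of_pos hp, ih t hr]
        | false =>
          rw [List.filter_cons_of_neg (by simp [hp]), List.filter_cons_of_neg (by simp [hp]),
            ih t hr]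

-- sign separation: the pass factors through the three sign classes
theorem pv_pairOff_split (l : List Int) :
    pvPairOff l = (pvPairOff (l.filter (fun x => decide (x < 0)))
      && pvPairOff (l.filter (fun x => decide (x = 0)))
      && pvPairOff (l.filter (fun x => decide (0 < x)))) := by
  induction hn : l.length using Nat.strong_induction_on generalizing l with
  | _ n ih =>
  cases l with
  | nil => simp [pvPairOff_nil]
  | cons x rest =>
    rw [pvPairOff_cons]
    rcases lt_trichotomy x 0 with hx | hx | hx
    · -- x < 0 : the negative class
      have h2x : (fun y => decide (y < 0)) (2*x) = true := by simp; omega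
      have hq0 : (fun y => decide (y = 0)) (2*x) = false := by simp; omega
      have hq2 : (fun y => decide (0 < y)) (2*x) = false := by simp; omega
      have hxc : (fun y => decide (y < 0)) x = true := by simp [hx]
      have hx0 : ¬ (fun y => decide (y = 0)) x = true := by simp; omega
      have hxp : ¬ (fun y => decide (0 < y)) x = true := by simp; omega
      rw [List.filter_cons_of_pos (p := fun y => decide (y < 0)) (a := x) (l := rest) hxc,
        List.filter_cons_of_neg (p := fun y => decide (y = 0)) (a := x) (l := rest) hx0,
        List.filter_cons_of_neg (p := fun y => decide (0 < y)) (a := x) (l := rest) hxp,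
        pvPairOff_cons, pv_remove_filter_pos rest (2*x) (fun y => decide (y < 0)) h2x]
      cases hr : PySem.List.remove? rest (2 * x) with
      | none => simp
      | some rest' =>
        simp only [Option.map_some]
        rw [ih rest'.length
          (by have := pv_remove?_length hr; simp at hn; omega) rest' rfl,
          pv_remove_filter_neg rest rest' (2*x) (fun y => decide (y = 0)) hq0 hr,
          pv_remove_filter_neg rest rest' (2*x) (fun y => decide (0 < y)) hq2 hr]
    · -- x = 0 : the zero class
      subst hx
      have h2x : (fun y => decide (y = 0)) ((2:Int)*0) = true := by simp
      have hq1 : (fun y => decide (y < 0)) ((2:Int)*0) = false := by simp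
      have hq2 : (fun y => decide (0 < y)) ((2:Int)*0) = false := by simp
      have hxc : (fun y => decide (y = 0)) (0:Int) = true := by simp
      have hxn : ¬ (fun y => decide (y < 0)) (0:Int) = true := by simp
      have hxp : ¬ (fun y => decide (0 < y)) (0:Int) = true := by simp
      rw [List.filter_cons_of_pos (p := fun y => decide (y = 0)) (a := (0:Int)) (l := rest) hxc,
        List.filter_cons_of_neg (p := fun y => decide (y < 0)) (a := (0:Int)) (l := rest) hxn,
        List.filter_cons_of_neg (p := fun y => decide (0 < y)) (a := (0:Int)) (l := rest) hxp,
        pvPairOff_cons, pv_remove_filter_pos rest ((2:Int)*0) (fun y => decide (y = 0)) h2x]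
      cases hr : PySem.List.remove? rest ((2:Int) * 0) with
      | none => simp
      | some rest' =>
        simp only [Option.map_some]
        rw [ih rest'.length
          (by have := pv_remove?_length hr; simp at hn; omega) rest' rfl,
          pv_remove_filter_neg rest rest' ((2:Int)*0) (fun y => decide (y < 0)) hq1 hr,
          pv_remove_filter_neg rest rest' ((2:Int)*0) (fun y => decide (0 < y)) hq2 hr]
    · -- 0 < x : the positive class
      have h2x : (fun y => decide (0 < y)) (2*x) = true := by simp; omega
      have hq0 : (fun y => decide (y = 0)) (2*x) = false := by simp; omega
      have hq1 : (fun y => decide (y < 0)) (2*x) = false := by simp; omega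
      have hxc : (fun y => decide (0 < y)) x = true := by simp [hx]
      have hx0 : ¬ (fun y => decide (y = 0)) x = true := by simp; omega
      have hxn : ¬ (fun y => decide (y < 0)) x = true := by simp; omega
      rw [List.filter_cons_of_pos (p := fun y => decide (0 < y)) (a := x) (l := rest) hxc,
        List.filter_cons_of_neg (p := fun y => decide (y = 0)) (a := x) (l := rest) hx0,
        List.filter_cons_of_neg (p := fun y => decide (y < 0)) (a := x) (l := rest) hxn,
        pvPairOff_cons, pv_remove_filter_pos rest (2*x) (fun y => decide (0 < y)) h2x]
      cases hr : PySem.List.remove? rest (2 * x) with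
      | none => simp
      | some rest' =>
        simp only [Option.map_some]
        rw [ih rest'.length
          (by have := pv_remove?_length hr; simp at hn; omega) rest' rfl,
          pv_remove_filter_neg rest rest' (2*x) (fun y => decide (y = 0)) hq0 hr,
          pv_remove_filter_neg rest rest' (2*x) (fun y => decide (y < 0)) hq1 hr]

theorem pv_filter_zero (l : List Int) :
    l.filter (fun x => decide (x = 0)) = List.replicate (l.count 0) 0 := by
  induction l with
  | nil => simp
  | cons a l ih =>
    by_cases h : a = 0
    · subst h; simp [ih, List.replicate_succ]
    · simp [h, ih]

theorem pv_pairOff_replicate (k : Nat) :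
    pvPairOff (List.replicate k 0) = decide (k % 2 = 0) := by
  induction k using Nat.strong_induction_on with
  | _ k ih =>
  match k with
  | 0 => simp [pvPairOff_nil]
  | 1 => rw [List.replicate_one, pvPairOff_cons]; simp [PySem.List.remove?]
  | (m+2) =>
    rw [List.replicate_succ, pvPairOff_cons]
    have : (2 : Int) * 0 = 0 := by ring
    rw [this, List.replicate_succ, PySem.List.remove?_cons_self]
    simp only []
    rw [ih m (by omega)]
    simp [Nat.add_mod_right]

theorem pv_pairOff_even (l : List Int) (h : pvPairOff l = true) : l.length % 2 = 0 := by
  induction hn : l.length using Nat.strong_induction_on generalizing l with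
  | _ n ih =>
  cases l with
  | nil => simp at hn; omega
  | cons x rest =>
    rw [pvPairOff_cons] at h
    cases hr : PySem.List.remove? rest (2 * x) with
    | none => rw [hr] at h; simp at h
    | some rest' =>
      rw [hr] at h
      have hm : (2 * x) ∈ rest := by
        by_contra hmem
        rw [(PySem.List.remove?_eq_none_iff rest (2*x)).mpr hmem] at hr; cases hr
      have he := PySem.List.remove?_eq_some_erase rest (2*x) hm
      rw [he] at hr
      cases hr
      have hlen := List.length_erase_of_mem hm
      have hpos : rest.length ≠ 0 := by
        intro h0; rw [List.length_eq_zero_iff] at h0; subst h0; simp at hm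
      have := ih (rest.erase (2*x)).length (by simp at hn; omega) (rest.erase (2*x)) h rfl
      simp at hn; omega

-- ===== VERDICT (by name: the statement is the Claim_ definition above) =====
-- abbreviations used by the assembly lemmas
theorem pv_mod_two (k : Nat) : PySem.Int.mod (k : Int) 2 = ((k % 2 : Nat) : Int) := by
  exact_mod_cast PySem.Int.mod_natCast k 2

theorem pv_mod_two_eq_zero (k : Nat) (h : k % 2 = 0) : PySem.Int.mod (k : Int) 2 = 0 := by
  rw [pv_mod_two]; exact_mod_cast h

theorem pv_mod_two_ne_zero (k : Nat) (h : k % 2 ≠ 0) : PySem.Int.mod (k : Int) 2 ≠ 0 := by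
  rw [pv_mod_two]; exact_mod_cast h

-- the positive part of the abs-sorted list is A's ascending sort of the positives
theorem pv_pos_part (arr : List Int) :
    (PySem.List.sorted arr (fun x => |x|) false).filter (fun x => decide (0 < x))
      = PySem.List.sorted (arr.filter (fun x => decide (0 < x))) (fun x => x) false := by
  have hperm : ((PySem.List.sorted arr (fun x => |x|) false).filter
      (fun x => decide (0 < x))).Perm (arr.filter (fun x => decide (0 < x))) :=
    (PySem.List.sorted_perm arr (fun x => |x|) false).filter _
  have hp1 : ((PySem.List.sorted arr (fun x => |x|) false).filter
      (fun x => decide (0 < x))).Pairwise (· ≤ ·) := by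
    have h0 := (PySem.List.sorted_pairwise arr (fun x => |x|)).filter (fun x => decide (0 < x))
    refine h0.imp_of_mem ?_
    intro a b ha hb hab
    have ha' : 0 < a := by simpa using (List.mem_filter.mp ha).2
    have hb' : 0 < b := by simpa using (List.mem_filter.mp hb).2
    rw [abs_of_pos ha', abs_of_pos hb'] at hab
    exact hab
  have hp2 : (PySem.List.sorted (arr.filter (fun x => decide (0 < x)))
      (fun x => x) false).Pairwise (· ≤ ·) :=
    PySem.List.sorted_pairwise _ (fun x => x)
  exact List.eq_of_perm_of_sorted (fun a b _ _ h1 h2 => le_antisymm h1 h2) hp1 hp2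
    (hperm.trans (PySem.List.sorted_perm _ _ _).symm)

-- the negative part of the abs-sorted list is A's descending sort of the negatives
theorem pv_neg_part (arr : List Int) :
    (PySem.List.sorted arr (fun x => |x|) false).filter (fun x => decide (x < 0))
      = PySem.List.sorted (arr.filter (fun x => decide (x < 0))) (fun x => x) true := by
  have hperm : ((PySem.List.sorted arr (fun x => |x|) false).filter
      (fun x => decide (x < 0))).Perm (arr.filter (fun x => decide (x < 0))) :=
    (PySem.List.sorted_perm arr (fun x => |x|) false).filter _
  have hp1 : ((PySem.List.sorted arr (fun x => |x|) false).filter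
      (fun x => decide (x < 0))).Pairwise (fun a b => b ≤ a) := by
    have h0 := (PySem.List.sorted_pairwise arr (fun x => |x|)).filter (fun x => decide (x < 0))
    refine h0.imp_of_mem ?_
    intro a b ha hb hab
    have ha' : a < 0 := by simpa using (List.mem_filter.mp ha).2
    have hb' : b < 0 := by simpa using (List.mem_filter.mp hb).2
    rw [abs_of_neg ha', abs_of_neg hb'] at hab
    omega
  have hp2 : (PySem.List.sorted (arr.filter (fun x => decide (x < 0)))
      (fun x => x) true).Pairwise (fun a b => b ≤ a) :=
    PySem.List.sorted_pairwise_rev _ (fun x => x)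
  exact List.eq_of_perm_of_sorted (fun a b _ _ h1 h2 => le_antisymm h2 h1) hp1 hp2
    (hperm.trans (PySem.List.sorted_perm _ _ _).symm)

-- A's queue equals B's pass on any nondecreasing list
theorem pv_queue_asc (l : List Int) (h : l.Pairwise (· ≤ ·)) :
    pvQueue l [] = pvPairOff l := by
  have := pv_queue_eq_pairOff l [] (by simpa using h) (by intro a t ht; cases ht)
  simpa using this

-- and on any nonincreasing list (via negation transport)
theorem pv_queue_desc (l : List Int) (h : l.Pairwise (fun a b => b ≤ a)) :
    pvQueue l [] = pvPairOff l := by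
  have h1 : pvQueue (l.map (fun x => -x)) [] = pvQueue l [] := by
    have := pv_queue_neg l []
    simpa using this
  have h2 : (l.map (fun x => -x)).Pairwise (· ≤ ·) := by
    rw [List.pairwise_map]
    exact h.imp (by intro a b hab; omega)
  rw [← h1, pv_queue_asc _ h2, pv_pairOff_neg]

theorem pv_pairOff_false_of_odd (l : List Int) (h : l.length % 2 ≠ 0) :
    pvPairOff l = false := by
  cases hp : pvPairOff l with
  | false => rfl
  | true => exact absurd (pv_pairOff_even l hp) h

-- ===== VERDICT (by name: the statement is the Claim_ definition above) =====
theorem solution_635_5_1_spec : Claim_equal_solution_635_5_1 := by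
  intro arr _
  unfold Spec_solution_635_5_1 solution_635_5_1 solution_635_5_1_alt
  rw [pv_partition]
  simp only [List.nil_append, zero_add]
  rw [pv_pairOff_split]
  set S := PySem.List.sorted arr (fun x => |x|) false with hSdef
  have hzero : S.filter (fun x => decide (x = 0)) = List.replicate (arr.count 0) 0 := by
    rw [pv_filter_zero, (PySem.List.sorted_perm arr (fun x => |x|) false).count_eq]
  have hzlen : (arr.filter (fun x => decide (x = 0))).length = arr.count 0 := by
    rw [pv_filter_zero]; simp
  by_cases hz : arr.count 0 % 2 = 0
  · by_cases hnn : (arr.filter (fun x => decide (x < 0))).length % 2 = 0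
    · by_cases hnp : (arr.filter (fun x => decide (0 < x))).length % 2 = 0
      · -- all even: both sides run the pairing
        rw [if_neg (by
          push_neg
          exact ⟨pv_mod_two_eq_zero _ (by rw [hzlen]; exact hz),
            pv_mod_two_eq_zero _ hnn, pv_mod_two_eq_zero _ hnp⟩)]
        -- rewrite B's three factors
        rw [hzero, pv_pairOff_replicate, pv_neg_part, pv_pos_part]
        rw [pv_queue_desc _ (PySem.List.sorted_pairwise_rev _ (fun x => x)),
          pv_queue_asc _ (PySem.List.sorted_pairwise _ (fun x => x))]
        simp [hz]
      · -- odd positive count: both sides are false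
        rw [if_pos (Or.inr (Or.inr (pv_mod_two_ne_zero _ hnp)))]
        have hlen : (S.filter (fun x => decide (0 < x))).length
            = (arr.filter (fun x => decide (0 < x))).length :=
          ((PySem.List.sorted_perm arr (fun x => |x|) false).filter _).length_eq
        rw [pv_pairOff_false_of_odd (S.filter (fun x => decide (0 < x)))
          (by rw [hlen]; exact hnp)]
        simp
    · -- odd negative count: both sides are false
      rw [if_pos (Or.inr (Or.inl (pv_mod_two_ne_zero _ hnn)))]
      have hlen : (S.filter (fun x => decide (x < 0))).length
          = (arr.filter (fun x => decide (x < 0))).length :=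
        ((PySem.List.sorted_perm arr (fun x => |x|) false).filter _).length_eq
      rw [pv_pairOff_false_of_odd (S.filter (fun x => decide (x < 0)))
        (by rw [hlen]; exact hnn)]
      simp
  · -- odd zero count: both sides are false
    rw [if_pos (Or.inl (pv_mod_two_ne_zero _ (by rw [hzlen]; exact hz)))]
    rw [hzero, pv_pairOff_replicate]
    simp [hz]
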